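-- pv_equiv track=rewrite | github.com/vineet131/project-euler | 500-550/546/problem546.py | f
-- ===== SOURCE A (Python) =====
-- from math import floor
--
-- def f(k, n):
--     num = [1]
--     if n == 0:
--         return num[0]
--     for i in range(1, k):
--         num.append(i + 1)
--     for j in range(k, n + 1):
--         num.append(num[floor(j/k)] + num[j-1])
--     if k > n:
--         return num[n]
--     return num[-1]
-- ===== SOURCE B (Python) =====
-- def f(k, n):
--     if n < k:
--         return n + 1
--     m = n // k
--     num = [1]
--     for q in range(1, min(k, m + 1)):
--         num.append(q + 1)
--     for j in range(k, m + 1):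
--         num.append(num[j // k] + num[j - 1])
--     r = n - m * k
--     return k + k * sum(num[1:m]) + (r + 1) * num[m]
-- ===== Notes on version B (the rewrite author's own statement) =====
-- stated objective: faster
-- what changed: B replaces A's O(n) iteration of num[j]=num[j//k]+num[j-1] up to n by computing the sequence only up to m=n//k and then evaluating num[n] via the closed block-sum num[n] = k + k*sum(num[1:m]) + (n%k+1)*num[m], grouping the floor(j/k) recurrence per block.
-- outside the precondition, e.g. on f(1, 0): A returns 1, B returns 1; on f(5, -2): A returns 4, B returns -1
import Mathlib
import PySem

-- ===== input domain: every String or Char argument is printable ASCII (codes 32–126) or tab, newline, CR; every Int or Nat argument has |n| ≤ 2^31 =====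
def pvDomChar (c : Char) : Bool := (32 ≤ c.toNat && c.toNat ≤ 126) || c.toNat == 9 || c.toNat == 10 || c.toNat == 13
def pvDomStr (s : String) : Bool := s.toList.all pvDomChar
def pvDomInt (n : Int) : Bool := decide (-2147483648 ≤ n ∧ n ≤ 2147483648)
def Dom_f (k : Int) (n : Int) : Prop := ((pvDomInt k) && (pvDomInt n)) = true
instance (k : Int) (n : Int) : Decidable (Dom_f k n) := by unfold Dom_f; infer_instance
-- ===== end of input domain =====

-- B computes the Project Euler 546 recurrence only up to n//k and finishes with the
-- closed block-sum num[n] = k + k*sum(num[1:m]) + (n%k+1)*num[m]  (objective: faster, O(k + n/k) vs O(n)).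

-- ===== PORT A =====
-- Python lists are dynamic arrays, so 'num' is an Array (append = push, O(1) indexing).
-- pyGetA is Python's num[i] (negative indices count from the end) with default 0 where
-- Python raises IndexError — reached only outside Pre_f.
def pyGetA (a : Array Int) (i : Int) : Int :=
  if 0 ≤ i then a.getD i.toNat 0 else a.getD (a.size - (-i).toNat) 0

-- Python's floor(j/k) (float division) equals integer floor division j//k for |j|,|k| ≤ 2^31
-- (the float rounding error |j/k|·2⁻⁵³ is smaller than the gap 1/|k| to the nearest integer),
-- so it is ported as PySem.Int.floordiv.
def f (k : Int) (n : Int) : Int :=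
  let num : Array Int := #[1]
  if n == 0 then pyGetA num 0
  else
    let num := (PySem.List.pyRange 1 k 1).foldl (fun acc i => acc.push (i + 1)) num
    let num := (PySem.List.pyRange k (n + 1) 1).foldl
      (fun acc j => acc.push (pyGetA acc (PySem.Int.floordiv j k)
                              + pyGetA acc (j - 1))) num
    if k > n then pyGetA num n
    else pyGetA num (-1)

-- ===== PORT B =====
def f_alt (k : Int) (n : Int) : Int :=
  if n < k then n + 1
  else
    let m := PySem.Int.floordiv n k
    let num : Array Int := #[1]
    let num := (PySem.List.pyRange 1 (min k (m + 1)) 1).foldl (fun acc q => acc.push (q + 1)) num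
    let num := (PySem.List.pyRange k (m + 1) 1).foldl
      (fun acc j => acc.push (pyGetA acc (PySem.Int.floordiv j k)
                              + pyGetA acc (j - 1))) num
    let r := n - m * k
    k + k * (PySem.List.slice num.toList (some 1) (some m)).sum + (r + 1) * pyGetA num m

-- ===== PRECONDITION & SPEC =====
-- Pre_ restricts to the problem's natural domain k ≥ 2, n ≥ 0: outside it A raises on almost
-- every input (IndexError for k = 1 with n ≥ 1 and for most n < 0, ZeroDivisionError for k = 0
-- with n ≥ 0); the few inputs there on which A still returns (e.g. (1,0) → 1, and (5,-2) → 4 by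
-- negative-index wraparound) are incidental and excluded with this natural-domain restriction.
def Pre_f (k : Int) (n : Int) : Prop := 2 ≤ k ∧ 0 ≤ n
instance (k : Int) (n : Int) : Decidable (Pre_f k n) := by unfold Pre_f; infer_instance
def pvWitness_f : Int × Int := (3, 10)

def Spec_f (k : Int) (n : Int) (out : Int) : Prop := out = f_alt k n
instance (k : Int) (n : Int) (out : Int) : Decidable (Spec_f k n out) := by unfold Spec_f; infer_instance

-- ===== CLAIM (what is proved, stated in full; the proofs are below) =====
def Claim_equal_f : Prop := ∀ (k : Int) (n : Int), Dom_f k n → Pre_f k n → Spec_f k n (f k n)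

-- ===== LEMMAS AND PROOFS =====

-- The mathematical sequence: gseq K j = num[j] of problem 546 (for K ≥ 2).
def gseq (K : Nat) (j : Nat) : Int :=
  if j < K then (j : Int) + 1
  else if K ≤ 1 then 0
  else gseq K (j / K) + gseq K (j - 1)
termination_by j
decreasing_by
  · exact Nat.div_lt_self (by omega) (by omega)
  · omega

theorem gseq_lt {K j : Nat} (h : j < K) : gseq K j = (j : Int) + 1 := by
  rw [gseq]; simp [h]

theorem gseq_rec {K j : Nat} (hk : 2 ≤ K) (h : K ≤ j) :
    gseq K j = gseq K (j / K) + gseq K (j - 1) := by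
  rw [gseq]; simp [Nat.not_lt.2 h]; omega

theorem pyGetA_toArray_natCast (l : List Int) (m : Nat) :
    pyGetA l.toArray ((m : Nat) : Int) = l.getD m 0 := by
  simp only [pyGetA, Int.toNat_natCast, if_pos (by omega : (0:Int) ≤ (m:Nat))]
  simp [Array.getD, List.getD]
  split <;> simp_all

theorem pyGetA_toArray_append_neg_one (l : List Int) (x : Int) :
    pyGetA (l ++ [x]).toArray (-1) = x := by
  simp only [pyGetA, if_neg (by omega : ¬ (0:Int) ≤ -1)]
  simp [Array.getD]

-- the first loop ("append i+1 for i in range(1, B)") builds [g 0, …, g (B-1)] when B ≤ K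
theorem first_loop (K : Nat) (B : Nat) (hk : 2 ≤ K) (hB : B ≤ K) (hB1 : 1 ≤ B) :
    (PySem.List.pyRange 1 (B : Int) 1).foldl (fun acc i => acc.push (i + 1)) #[1]
      = ((List.range B).map (gseq K)).toArray := by
  induction B with
  | zero => omega
  | succ B ih =>
    rcases Nat.eq_or_lt_of_le hB1 with h1 | h1
    · -- B + 1 = 1
      have : B = 0 := by omega
      subst this
      simp [PySem.List.pyRange_one_eq_nil, List.range_succ, gseq_lt (show 0 < K by omega)]
    · have hB0 : 1 ≤ B := by omega
      rw [show ((B + 1 : Nat) : Int) = (B : Int) + 1 by push_cast; ring,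
          PySem.List.pyRange_one_succ_right (by exact_mod_cast hB0)]
      rw [List.foldl_append, ih (by omega) hB0]
      simp only [List.foldl_cons, List.foldl_nil, List.push_toArray]
      simp [List.range_succ, gseq_lt (show B < K by omega)]

-- the recurrence loop: starting from [g 0, …, g (t-1)] with K ≤ t, folding j = t, …, t+c-1
-- appends g t, …, g (t+c-1)
theorem rec_loop (K : Nat) (hk : 2 ≤ K) (t : Nat) (ht : K ≤ t) (c : Nat) :
    (PySem.List.pyRange (t : Int) ((t + c : Nat) : Int) 1).foldl
      (fun acc j => acc.push (pyGetA acc (PySem.Int.floordiv j (K : Int))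
                              + pyGetA acc (j - 1)))
      ((List.range t).map (gseq K)).toArray
    = ((List.range (t + c)).map (gseq K)).toArray := by
  induction c with
  | zero => simp [PySem.List.pyRange_one_eq_nil]
  | succ c ih =>
    have hcast : ((t + (c + 1) : Nat) : Int) = ((t + c : Nat) : Int) + 1 := by push_cast; ring
    rw [hcast, PySem.List.pyRange_one_succ_right (by exact_mod_cast Nat.le_add_right t c),
        List.foldl_append, ih]
    have hdivlt : (t + c) / K < t + c := Nat.div_lt_self (by omega) (by omega)
    have h1 : pyGetA ((List.range (t + c)).map (gseq K)).toArray
        (PySem.Int.floordiv ((t + c : Nat) : Int) (K : Int)) = gseq K ((t + c) / K) := by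
      rw [PySem.Int.floordiv_natCast, pyGetA_toArray_natCast]
      simp [List.getD, hdivlt]
    have h2 : pyGetA ((List.range (t + c)).map (gseq K)).toArray
        (((t + c : Nat) : Int) - 1) = gseq K (t + c - 1) := by
      rw [show ((t + c : Nat) : Int) - 1 = ((t + c - 1 : Nat) : Int) by push_cast [Nat.cast_sub (by omega : 1 ≤ t + c)]; ring,
          pyGetA_toArray_natCast]
      simp [List.getD, show t + c - 1 < t + c by omega]
    simp only [List.foldl_cons, List.foldl_nil]
    rw [h1, h2, List.push_toArray, show t + (c + 1) = (t + c) + 1 by ring, List.range_succ]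
    rw [List.map_append, List.map_singleton, gseq_rec hk (by omega : K ≤ t + c)]

-- characterisation of port A
theorem f_eq (k n : Int) (hk : 2 ≤ k) (hn : 0 ≤ n) : f k n = gseq k.toNat n.toNat := by
  have hkK : ((k.toNat : Nat) : Int) = k := Int.toNat_of_nonneg (by omega)
  have hnN : ((n.toNat : Nat) : Int) = n := Int.toNat_of_nonneg hn
  have hK2 : 2 ≤ k.toNat := by omega
  by_cases h0 : n = 0
  · subst h0
    simp only [f, beq_self_eq_true, if_true]
    simp [pyGetA, gseq_lt (show 0 < k.toNat by omega)]
  · have hne : (n == 0) = false := by simp [h0]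
    simp only [f, hne, Bool.false_eq_true, if_false]
    rw [← hkK, first_loop k.toNat k.toNat hK2 le_rfl (by omega)]
    by_cases hkn : n < k
    · rw [PySem.List.pyRange_one_eq_nil (by omega)]
      simp only [List.foldl_nil]
      rw [if_pos (by omega)]
      rw [← hnN, pyGetA_toArray_natCast]
      simp [List.getD, show n.toNat < k.toNat by omega]
      congr 1 <;> omega
    · have hc : n + 1 = ((k.toNat + (n.toNat + 1 - k.toNat) : Nat) : Int) := by push_cast; omega
      rw [hc, rec_loop k.toNat hK2 k.toNat le_rfl (n.toNat + 1 - k.toNat)]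
      rw [show k.toNat + (n.toNat + 1 - k.toNat) = n.toNat + 1 by omega]
      rw [if_neg (by omega)]
      rw [List.range_succ, List.map_append, List.map_singleton,
          pyGetA_toArray_append_neg_one, Int.toNat_natCast]

-- partial sums of gseq starting at 1: S K M = g 1 + … + g M
def gsum (K M : Nat) : Int := ((List.range' 1 M).map (gseq K)).sum

theorem gsum_succ (K M : Nat) : gsum K (M + 1) = gsum K M + gseq K (M + 1) := by
  unfold gsum
  rw [List.range'_1_concat, List.map_append, List.sum_append]
  simp [Nat.add_comm]

-- sum(num[1:m]) of the list [g 0, …, g M] is g 1 + … + g (M-1)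
theorem slice_sum (K M : Nat) (hM : 1 ≤ M) :
    (PySem.List.slice ((List.range (M + 1)).map (gseq K)) (some 1) (some ((M : Nat) : Int))).sum
      = gsum K (M - 1) := by
  obtain ⟨M', rfl⟩ : ∃ M', M = M' + 1 := ⟨M - 1, by omega⟩
  have h := PySem.List.slice_natCast (xs := (List.range (M' + 1 + 1)).map (gseq K)) (a := 1) (b := M' + 1)
  norm_num at h ⊢
  rw [h]
  have htail : ((List.range (M' + 1 + 1)).map (gseq K)).tail
      = (List.range' 1 (M' + 1)).map (gseq K) := by
    rw [List.range_succ_eq_map, List.range'_eq_map_range]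
    simp [Nat.add_comm]
  rw [htail, List.range'_1_concat, List.map_append, List.take_left' (by simp)]
  simp [gsum]

-- the block-sum identity
theorem block_sum (K : Nat) (hk : 2 ≤ K) (N : Nat) (hN : K ≤ N) :
    gseq K N = (K : Int) + (K : Int) * gsum K (N / K - 1)
      + (((N % K : Nat) : Int) + 1) * gseq K (N / K) := by
  induction N, hN using Nat.le_induction with
  | base =>
    rw [gseq_rec hk le_rfl, Nat.div_self (by omega), Nat.mod_self]
    have h1 : gseq K (K - 1) = ((K - 1 : Nat) : Int) + 1 := gseq_lt (by omega)
    rw [h1]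
    simp [gsum]
    push_cast [Nat.cast_sub (show 1 ≤ K by omega)]
    ring_nf
  | succ N hN ih =>
    have hK0 : 0 < K := by omega
    have hNd : K * (N / K) + N % K = N := Nat.div_add_mod N K
    have hr : N % K < K := Nat.mod_lt _ hK0
    have hM1 : 1 ≤ N / K := (Nat.one_le_div_iff hK0).2 hN
    have hsplit : N + 1 = K * (N / K) + (N % K + 1) := by omega
    have hdiv1 : (N + 1) / K = N / K + (N % K + 1) / K := by
      rw [hsplit, Nat.mul_add_div hK0]
    have hmod1 : (N + 1) % K = (N % K + 1) % K := by
      rw [hsplit, Nat.mul_add_mod]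
    rw [gseq_rec hk (by omega : K ≤ N + 1), show N + 1 - 1 = N from rfl, ih]
    by_cases hcase : N % K + 1 < K
    · rw [hdiv1, Nat.div_eq_of_lt hcase, hmod1, Nat.mod_eq_of_lt hcase]
      push_cast
      ring_nf
    · have hrK : N % K + 1 = K := by omega
      rw [hdiv1, hmod1, hrK, Nat.div_self hK0, Nat.mod_self]
      rw [show N / K + 1 - 1 = (N / K - 1) + 1 by omega, gsum_succ,
          show N / K - 1 + 1 = N / K by omega]
      have hcast : ((N % K : Nat) : Int) + 1 = (K : Int) := by push_cast; omega
      rw [hcast]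
      push_cast
      ring_nf

-- characterisation of port B
theorem falt_eq (k n : Int) (hk : 2 ≤ k) (hn : 0 ≤ n) : f_alt k n = gseq k.toNat n.toNat := by
  have hkK : ((k.toNat : Nat) : Int) = k := Int.toNat_of_nonneg (by omega)
  have hnN : ((n.toNat : Nat) : Int) = n := Int.toNat_of_nonneg hn
  have hK2 : 2 ≤ k.toNat := by omega
  by_cases hlt : n < k
  · simp only [f_alt, if_pos hlt]
    rw [gseq_lt (show n.toNat < k.toNat by omega), hnN]
  · simp only [f_alt, if_neg hlt]
    have hNK : k.toNat ≤ n.toNat := by omega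
    have hm : PySem.Int.floordiv n k = ((n.toNat / k.toNat : Nat) : Int) := by
      have h := PySem.Int.floordiv_natCast n.toNat k.toNat
      rw [hnN, hkK] at h
      exact h
    set M := n.toNat / k.toNat with hMdef
    have hM1 : 1 ≤ M := (Nat.one_le_div_iff (by omega)).2 hNK
    rw [hm]
    have hmin : min k ((M : Int) + 1) = ((min k.toNat (M + 1) : Nat) : Int) := by
      push_cast; rw [hkK]
    rw [hmin, first_loop k.toNat (min k.toNat (M + 1)) hK2 (min_le_left _ _) (by omega)]
    -- after both loops the list is [g 0, …, g M], in either case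
    have hlist : (PySem.List.pyRange k ((M : Int) + 1) 1).foldl
        (fun acc j => acc.push (pyGetA acc (PySem.Int.floordiv j k)
                                + pyGetA acc (j - 1)))
        ((List.range (min k.toNat (M + 1))).map (gseq k.toNat)).toArray
        = ((List.range (M + 1)).map (gseq k.toNat)).toArray := by
      by_cases hKM : k.toNat ≤ M
      · rw [show min k.toNat (M + 1) = k.toNat by omega, ← hkK,
            show ((M : Nat) : Int) + 1 = ((k.toNat + (M + 1 - k.toNat) : Nat) : Int) by push_cast; omega]
        simp only [Int.toNat_natCast]
        rw [rec_loop k.toNat hK2 k.toNat le_rfl (M + 1 - k.toNat),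
            show k.toNat + (M + 1 - k.toNat) = M + 1 by omega]
      · rw [show min k.toNat (M + 1) = M + 1 by omega,
            PySem.List.pyRange_one_eq_nil (by omega)]
        simp
    rw [hlist]
    have hget : pyGetA ((List.range (M + 1)).map (gseq k.toNat)).toArray ((M : Nat) : Int)
        = gseq k.toNat M := by
      rw [pyGetA_toArray_natCast]
      simp [List.getD]
    rw [hget, slice_sum k.toNat M hM1]
    have hrval : n - (M : Int) * k + 1 = ((n.toNat % k.toNat : Nat) : Int) + 1 := by
      have h2 : k.toNat * M + n.toNat % k.toNat = n.toNat := Nat.div_add_mod n.toNat k.toNat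
      have h4 : (M : Int) * k = ((k.toNat * M : Nat) : Int) := by
        push_cast; rw [hkK]; ring
      rw [h4]
      generalize k.toNat * M = P at h2 ⊢
      omega
    rw [hrval, block_sum k.toNat hK2 n.toNat hNK]
    rw [← hMdef, hkK]

-- ===== VERDICT (by name: the statement is the Claim_ definition above) =====
theorem f_spec : Claim_equal_f := by
  intro k n _ hpre
  unfold Spec_f
  rw [f_eq k n hpre.1 hpre.2, falt_eq k n hpre.1 hpre.2]
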